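-- pv_equiv track=rewrite | github.com/asimfish/ShrimpFlow | server/services/skill_tracker.py | _infer_roles
-- ===== SOURCE A (Python) =====
-- def _infer_roles(skill_name, sequence):
--     roles = []
--     if len(sequence) <= 1:
--         return roles
--
--     for index, name in enumerate(sequence):
--         if name != skill_name:
--             continue
--         if index == 0:
--             roles.append("initiator")
--         elif index == len(sequence) - 1:
--             roles.append("finalizer")
--         else:
--             roles.append("middle")
--     return list(dict.fromkeys(roles))
-- ===== SOURCE B (Python) =====
-- def _infer_roles(skill_name, sequence):
--     n = len(sequence)
--     if n <= 1:
--         return []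
--     roles = []
--     if sequence[0] == skill_name:
--         roles.append("initiator")
--     if any(sequence[i] == skill_name for i in range(1, n - 1)):
--         roles.append("middle")
--     if sequence[-1] == skill_name:
--         roles.append("finalizer")
--     return roles
-- ===== Notes on version B (the rewrite author's own statement) =====
-- stated objective: simpler
-- what changed: Replaces the tagging loop plus dict.fromkeys dedup with three direct positional checks (first element, any interior element, last element) appended in the fixed order initiator/middle/finalizer, which is exactly A's occurrence-order dedup result.
import Mathlib
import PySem

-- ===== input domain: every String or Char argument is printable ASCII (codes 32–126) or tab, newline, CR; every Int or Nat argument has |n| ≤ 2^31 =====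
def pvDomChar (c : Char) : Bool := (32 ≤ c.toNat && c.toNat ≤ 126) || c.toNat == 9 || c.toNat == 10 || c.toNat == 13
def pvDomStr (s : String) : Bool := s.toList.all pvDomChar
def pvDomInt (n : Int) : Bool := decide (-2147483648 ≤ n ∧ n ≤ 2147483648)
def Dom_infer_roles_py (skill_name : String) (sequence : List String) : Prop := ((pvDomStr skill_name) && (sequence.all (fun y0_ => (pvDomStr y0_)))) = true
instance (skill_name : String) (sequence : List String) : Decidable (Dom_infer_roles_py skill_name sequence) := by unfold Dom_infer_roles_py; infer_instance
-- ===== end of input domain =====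

-- B replaces A's tagging loop + dict.fromkeys dedup by three direct positional checks appended in fixed order (simpler decomposition).

-- ===== PORT A =====
def infer_roles_py (skill_name : String) (sequence : List String) : List String :=
  let roles : List String := []
  if sequence.length ≤ 1 then roles
  else
    let roles := (PySem.List.enumerate sequence 0).foldl
      (fun roles p =>
        if p.2 ≠ skill_name then roles
        else if p.1 = 0 then roles ++ ["initiator"]
        else if p.1 = (sequence.length : Int) - 1 then roles ++ ["finalizer"]
        else roles ++ ["middle"]) roles
    PySem.List.dedup roles

-- ===== PORT B =====
def infer_roles_py_alt (skill_name : String) (sequence : List String) : List String :=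
  let n := sequence.length
  if n ≤ 1 then []
  else
    (if PySem.List.pyGet? sequence 0 = some skill_name then ["initiator"] else []) ++
    (if (PySem.List.pyRange 1 ((n : Int) - 1) 1).any
        (fun i => PySem.List.pyGet? sequence i = some skill_name) then ["middle"] else []) ++
    (if PySem.List.pyGet? sequence (-1) = some skill_name then ["finalizer"] else [])

-- ===== PRECONDITION & SPEC =====
def Spec_infer_roles_py (skill_name : String) (sequence : List String) (out : List String) : Prop := out = infer_roles_py_alt skill_name sequence
instance (skill_name : String) (sequence : List String) (out : List String) : Decidable (Spec_infer_roles_py skill_name sequence out) := by unfold Spec_infer_roles_py; infer_instance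

-- ===== CLAIM (what is proved, stated in full; the proofs are below) =====
def Claim_equal_infer_roles_py : Prop := ∀ (skill_name : String) (sequence : List String), Dom_infer_roles_py skill_name sequence → Spec_infer_roles_py skill_name sequence (infer_roles_py skill_name sequence)

-- ===== LEMMAS AND PROOFS =====

-- middle-fold lemma
theorem fold_mid (skill : String) (N : Int) (L : List (Int × String))
    (h : ∀ p ∈ L, p.1 ≠ 0 ∧ p.1 ≠ N) (init : List String) :
    L.foldl (fun roles p =>
      if p.2 ≠ skill then roles
      else if p.1 = 0 then roles ++ ["initiator"]
      else if p.1 = N then roles ++ ["finalizer"]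
      else roles ++ ["middle"]) init
    = init ++ List.replicate (L.countP (fun p => p.2 == skill)) "middle" := by
  induction L generalizing init with
  | nil => simp
  | cons q t ih =>
    obtain ⟨h0, hN⟩ := h q (by simp)
    by_cases hq : q.2 = skill
    · simp only [List.foldl_cons, List.countP_cons, hq, ne_eq, not_true_eq_false, if_false,
        h0, hN, if_false, BEq.rfl, if_true]
      rw [ih (fun p hp => h p (by simp [hp]))]
      simp [List.replicate_succ]
    · simp only [List.foldl_cons, List.countP_cons, hq, ne_eq, not_false_eq_true, if_true]
      rw [ih (fun p hp => h p (by simp [hp]))]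
      simp [hq]

theorem foldl_add_rep (c : String) (n : Nat) (s : PySem.Set String) (h : c ∈ s) :
    List.foldl PySem.Set.add s (List.replicate n c) = s := by
  induction n with
  | zero => rfl
  | succ j ih => rw [List.replicate_succ, List.foldl_cons, PySem.Set.add_of_mem h, ih]

theorem dedup_IMF (P Q : Prop) [Decidable P] [Decidable Q] (k : Nat) :
    PySem.List.dedup ((if P then ["initiator"] else []) ++ List.replicate k "middle"
      ++ (if Q then ["finalizer"] else []))
    = (if P then ["initiator"] else []) ++ (if k = 0 then [] else ["middle"])
      ++ (if Q then ["finalizer"] else []) := by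
  rw [PySem.List.dedup_eq_ofList, PySem.Set.ofList_append, PySem.Set.ofList_append]
  by_cases hp : P <;> by_cases hq : Q <;> cases k <;>
    simp [hp, hq, PySem.Set.ofList, PySem.Set.update, PySem.Set.add, PySem.Set.contains,
      List.replicate_succ, foldl_add_rep]

theorem key (skill x z : String) (mid : List String) :
    infer_roles_py skill (x :: (mid ++ [z])) = infer_roles_py_alt skill (x :: (mid ++ [z])) := by
  have hlen : (x :: (mid ++ [z])).length = mid.length + 2 := by simp
  have henum : PySem.List.enumerate (x :: (mid ++ [z])) 0
      = (0, x) :: (PySem.List.enumerate mid 1 ++ [((1 + mid.length : Int), z)]) := by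
    rw [PySem.List.enumerate_cons, PySem.List.enumerate_append]
    simp [PySem.List.enumerate_cons, PySem.List.enumerate_nil]
  have hcount : (PySem.List.enumerate mid 1).countP (fun p => p.2 == skill)
      = mid.countP (· == skill) := by
    have h := List.countP_map (p := fun s => s == skill) (f := fun p : Int × String => p.2)
      (l := PySem.List.enumerate mid 1)
    rw [PySem.List.map_snd_enumerate] at h
    exact h.symm
  have hmidmem : ∀ p ∈ PySem.List.enumerate mid 1,
      p.1 ≠ 0 ∧ p.1 ≠ ((x :: (mid ++ [z])).length : Int) - 1 := by
    intro p hp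
    rw [PySem.List.mem_enumerate_iff] at hp
    obtain ⟨k, hk, rfl⟩ := hp
    rw [hlen]
    constructor <;> simp <;> omega
  have hget : ∀ (k : Nat) (hk : k < mid.length),
      PySem.List.pyGet? (x :: (mid ++ [z])) (1 + (k : Int)) = some (mid[k]'hk) := by
    intro k hk
    rw [show (1 + (k : Int)) = ((k : Int) + 1) by ring, PySem.List.pyGet?_cons_succ,
      PySem.List.pyGet?_natCast, List.getElem?_append_left hk, List.getElem?_eq_getElem hk]
  have hany : ((List.range mid.length).any
        (fun k => decide (PySem.List.pyGet? (x :: (mid ++ [z])) (1 + (k : Int)) = some skill)) = true)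
      ↔ skill ∈ mid := by
    simp only [List.any_eq_true, List.mem_range]
    constructor
    · rintro ⟨k, hk, hd⟩
      rw [hget k hk] at hd
      simp only [decide_eq_true_eq, Option.some.injEq] at hd
      exact hd ▸ List.getElem_mem hk
    · intro hmm
      obtain ⟨k, hk, hke⟩ := List.mem_iff_getElem.mp hmm
      exact ⟨k, hk, by rw [hget k hk, hke]; simp⟩
  have hcnt0 : (mid.countP (· == skill) = 0) ↔ ¬ skill ∈ mid := by
    rw [List.countP_eq_zero]
    constructor
    · intro h hmem; simpa using h skill hmem
    · intro h a ha hae; exact h ((by simpa using hae : a = skill) ▸ ha)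
  have hrange : PySem.List.pyRange 1 (((mid.length + 2 : Nat) : Int) - 1) 1
      = (List.range mid.length).map (fun k : Nat => 1 + (k : Int)) := by
    rw [PySem.List.pyRange_one]
    have h : ((((mid.length + 2 : Nat) : Int) - 1) - 1).toNat = mid.length := by omega
    rw [h]
  have hlast : (x :: (mid ++ [z])).getLast? = some z := by
    rw [show x :: (mid ++ [z]) = (x :: mid) ++ [z] from rfl, List.getLast?_concat]
  have hN : (1 + (mid.length : Int)) = (((x :: (mid ++ [z])).length : Nat) : Int) - 1 := by
    rw [hlen]; push_cast; omega
  have hN0 : ¬ (1 + (mid.length : Int)) = 0 := by omega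
  simp only [infer_roles_py, infer_roles_py_alt]
  rw [if_neg (by simp), if_neg (by simp)]
  rw [henum, List.foldl_cons, List.foldl_append, fold_mid skill _ _ hmidmem,
    List.foldl_cons, List.foldl_nil, hcount]
  rw [PySem.List.pyGet?_zero_cons, PySem.List.pyGet?_neg_one, hlast, hlen, hrange, List.any_map]
  simp only [Function.comp_def]
  have hN' : (1 + (mid.length : Int)) = ((mid.length + 2 : Nat) : Int) - 1 := by push_cast; omega
  rw [if_neg (show ¬ ((1 + (mid.length : Int), z).1 = 0) from hN0),
      if_pos (show ((1 + (mid.length : Int), z).1 = ((mid.length + 2 : Nat) : Int) - 1) from hN')]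
  by_cases hm : skill ∈ mid
  · have hT := hany.mpr hm
    have hc0 : ¬ (List.countP (fun x => x == skill) mid = 0) := fun h => (hcnt0.mp h) hm
    by_cases hx : x = skill <;> by_cases hz : z = skill <;>
      · have hd := dedup_IMF (x = skill) (z = skill) (List.countP (fun x => x == skill) mid)
        simp [hx, hz, hc0] at hd
        try rw [hx] at hT
        try rw [hz] at hT
        simp [hx, hz, hT, hc0, hd]
  · have hF : ¬ (((List.range mid.length).any
        fun k => decide (PySem.List.pyGet? (x :: (mid ++ [z])) (1 + (k : Int)) = some skill)) = true) :=
      fun h => hm (hany.mp h)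
    have hc : List.countP (fun x => x == skill) mid = 0 := hcnt0.mpr hm
    by_cases hx : x = skill <;> by_cases hz : z = skill <;>
      · have hd := dedup_IMF (x = skill) (z = skill) (List.countP (fun x => x == skill) mid)
        simp [hx, hz, hc] at hd
        try rw [hx] at hF
        try rw [hz] at hF
        simp [hx, hz, hF, hc, hd]

-- ===== VERDICT (by name: the statement is the Claim_ definition above) =====
theorem infer_roles_py_spec : Claim_equal_infer_roles_py := by
  intro skill seq _
  unfold Spec_infer_roles_py
  rcases seq with _ | ⟨x, rest⟩
  · rfl
  rcases List.eq_nil_or_concat rest with h | ⟨mid, z, h⟩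
  · subst h; rfl
  · rw [h, List.concat_eq_append]
    exact key skill x z mid
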